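-- pv_equiv track=rewrite | github.com/jdsalas065/SEO-GEO-Generator | app/image_search.py | inject_figures
-- ===== SOURCE A (Python) =====
-- def inject_figures(md: str, selected_h2_to_figure_html: dict[int, str]) -> str:
--     """Inject figure HTML immediately after selected H2 line indices."""
--     if not selected_h2_to_figure_html:
--         return md
--
--     lines = md.splitlines()
--     output: list[str] = []
--     for idx, line in enumerate(lines):
--         output.append(line)
--         figure = selected_h2_to_figure_html.get(idx)
--         if figure:
--             output.append(figure)
--
--     return "\n".join(output) + ("\n" if md.endswith("\n") else "")
-- ===== SOURCE B (Python) =====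
-- def inject_figures(md: str, selected_h2_to_figure_html: dict[int, str]) -> str:
--     """Inject figure HTML immediately after selected H2 line indices."""
--     if not selected_h2_to_figure_html:
--         return md
--
--     lines = md.splitlines()
--     n = len(lines)
--     for idx in sorted(selected_h2_to_figure_html, reverse=True):
--         figure = selected_h2_to_figure_html[idx]
--         if figure and 0 <= idx < n:
--             lines.insert(idx + 1, figure)
--
--     return "\n".join(lines) + ("\n" if md.endswith("\n") else "")
-- ===== Notes on version B (the rewrite author's own statement) =====
-- stated objective: alternative
-- what changed: Instead of rebuilding the line list by scanning every line and probing the dict at each index, B iterates over the dict's keys sorted in descending order and inserts each truthy figure after its line in place, so the work is driven by the (usually few) selected indices rather than by every line.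
import Mathlib
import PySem

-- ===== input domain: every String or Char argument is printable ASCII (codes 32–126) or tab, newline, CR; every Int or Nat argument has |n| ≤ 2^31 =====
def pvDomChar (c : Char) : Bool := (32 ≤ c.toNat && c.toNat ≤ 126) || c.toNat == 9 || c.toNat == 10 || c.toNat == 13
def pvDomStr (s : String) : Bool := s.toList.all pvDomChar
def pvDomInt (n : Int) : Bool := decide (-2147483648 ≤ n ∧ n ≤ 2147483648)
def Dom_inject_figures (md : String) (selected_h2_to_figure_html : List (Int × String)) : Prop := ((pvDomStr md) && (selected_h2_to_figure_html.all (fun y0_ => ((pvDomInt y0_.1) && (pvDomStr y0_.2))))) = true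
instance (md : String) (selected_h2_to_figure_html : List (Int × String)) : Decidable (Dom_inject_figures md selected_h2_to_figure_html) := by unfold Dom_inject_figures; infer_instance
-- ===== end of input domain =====

-- B drives the injection off the dict's keys (sorted descending, inserting in place) instead of scanning every line and probing the dict; return value proved equal to A's on the whole domain.


-- ===== PORT A =====
-- The Python dict parameter arrives as an association list; it is marshalled into a
-- PySem.Dict (insertion order, later duplicate keys overwrite) before use, which is
-- exactly how Python builds the dict the function receives.
def inject_figures (md : String) (selected_h2_to_figure_html : List (Int × String)) : String :=
  let dd : PySem.Dict Int String :=
    selected_h2_to_figure_html.foldl (fun d p => d.insert p.1 p.2) PySem.Dict.empty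
  if selected_h2_to_figure_html.isEmpty then md
  else
    let lines := PySem.Str.splitlines md
    let output : List String :=
      (PySem.List.enumerate lines).foldl (fun out p =>
        let out := out ++ [p.2]
        match dd.get? p.1 with          -- figure = dict.get(idx)
        | some figure => if figure ≠ "" then out ++ [figure] else out
        | none => out) []
    PySem.Str.join "\n" output ++ (if PySem.Str.endswith md "\n" then "\n" else "")

-- ===== PORT B =====
def inject_figures_alt (md : String) (selected_h2_to_figure_html : List (Int × String)) : String :=
  let dd : PySem.Dict Int String :=
    selected_h2_to_figure_html.foldl (fun d p => d.insert p.1 p.2) PySem.Dict.empty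
  if selected_h2_to_figure_html.isEmpty then md
  else
    let lines0 := PySem.Str.splitlines md
    let n : Int := lines0.length
    let lines :=
      (PySem.List.sorted dd.keys id true).foldl (fun ls idx =>
        let figure := dd.getD idx ""    -- d[idx]: idx comes from the keys, so it is present
        if figure ≠ "" && decide (0 ≤ idx) && decide (idx < n) then
          PySem.List.insert ls (idx + 1) figure
        else ls) lines0
    PySem.Str.join "\n" lines ++ (if PySem.Str.endswith md "\n" then "\n" else "")

-- ===== PRECONDITION & SPEC =====
def Spec_inject_figures (md : String) (selected_h2_to_figure_html : List (Int × String)) (out : String) : Prop := out = inject_figures_alt md selected_h2_to_figure_html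
instance (md : String) (selected_h2_to_figure_html : List (Int × String)) (out : String) : Decidable (Spec_inject_figures md selected_h2_to_figure_html out) := by unfold Spec_inject_figures; infer_instance

-- ===== CLAIM (what is proved, stated in full; the proofs are below) =====
def Claim_equal_inject_figures : Prop := ∀ (md : String) (selected_h2_to_figure_html : List (Int × String)), Dom_inject_figures md selected_h2_to_figure_html → Spec_inject_figures md selected_h2_to_figure_html (inject_figures md selected_h2_to_figure_html)

-- ===== LEMMAS AND PROOFS =====

-- the interleaving both programs produce: each line, followed by its figure when index i is selected
def pvWeave (dd : PySem.Dict Int String) (ks : List Int) : Int → List String → List String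
  | _, [] => []
  | i, l :: ls => l :: (if i ∈ ks then [dd.getD i ""] else []) ++ pvWeave dd ks (i + 1) ls

theorem pvWeave_nil_keys (dd : PySem.Dict Int String) (ks : List Int) (ls : List String) (i : Int)
    (h : ∀ j ∈ ks, j < i) : pvWeave dd ks i ls = ls := by
  induction ls generalizing i with
  | nil => rfl
  | cons l ls ih =>
    have hni : i ∉ ks := fun hm => absurd (h i hm) (by omega)
    simp [pvWeave, hni, ih (i + 1) (fun j hj => by have := h j hj; omega)]

theorem pvInsert_eq (xs : List String) (i : Int) (v : String) (h : 0 ≤ i) :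
    PySem.List.insert xs i v = List.take i.toNat xs ++ v :: List.drop i.toNat xs := by
  have hnot : ¬ i < 0 := by omega
  by_cases h2 : i ≤ xs.length
  · have hmin : min i (xs.length : Int) = i := by omega
    simp [PySem.List.insert, PySem.List.sliceIndices, hnot, hmin]
  · have hmin : min i (xs.length : Int) = (xs.length : Int) := by omega
    simp [PySem.List.insert, PySem.List.sliceIndices, hnot, hmin,
      List.take_of_length_le (by omega : xs.length ≤ i.toNat),
      List.drop_of_length_le (by omega : xs.length ≤ i.toNat)]

theorem pvWeave_insert (dd : PySem.Dict Int String) (ks : List Int) (k : Int)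
    (ls : List String) (i : Int)
    (hik : i ≤ k) (hk : k < i + ls.length) (hks : ∀ j ∈ ks, j < k) :
    pvWeave dd ks i (List.take (k + 1 - i).toNat ls ++ dd.getD k "" :: List.drop (k + 1 - i).toNat ls)
      = pvWeave dd (k :: ks) i ls := by
  induction ls generalizing i with
  | nil => simp at hk; omega
  | cons l ls ih =>
    have h1 : (k + 1 - i).toNat = (k - i).toNat + 1 := by omega
    rw [h1]
    simp only [List.take_succ_cons, List.drop_succ_cons, List.cons_append]
    by_cases hik' : i = k
    · have h0 : (k - i).toNat = 0 := by omega
      simp only [h0, List.take_zero, List.drop_zero, List.nil_append]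
      have hni : i ∉ ks := fun hm => absurd (hks i hm) (by omega)
      have hmemi : i ∈ k :: ks := by simp [hik']
      simp only [pvWeave, if_neg hni, if_pos hmemi]
      have hn1 : (i + 1) ∉ ks := fun hm => absurd (hks _ hm) (by omega)
      simp only [if_neg hn1, List.singleton_append]
      rw [pvWeave_nil_keys dd ks ls (i + 1 + 1) (fun j hj => by have := hks j hj; omega),
          pvWeave_nil_keys dd (k :: ks) ls (i + 1)
            (fun j hj => by
              rcases List.mem_cons.mp hj with h | h
              · omega
              · have := hks j h; omega)]
      simp [hik']
    · have hlt : i < k := by omega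
      have h2 : (k - i).toNat = (k + 1 - (i + 1)).toNat := by omega
      simp only [pvWeave]
      have hmem : (i ∈ k :: ks) ↔ (i ∈ ks) := by
        simp only [List.mem_cons]
        constructor
        · rintro (h | h)
          · omega
          · exact h
        · exact Or.inr
      rw [h2, ih (i + 1) (by omega) (by simp at hk ⊢; omega)]
      by_cases hi : i ∈ ks
      · simp [hmem, hi]
      · simp [hmem, hi]

-- B's insertion loop over a strictly descending list of in-range keys builds the weave
theorem pvFold_insert_eq_weave (dd : PySem.Dict Int String) (ks : List Int) (lines : List String)
    (hsort : List.Pairwise (fun a b => b < a) ks)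
    (hmem : ∀ k ∈ ks, 0 ≤ k ∧ k < lines.length) :
    ks.foldl (fun ls idx =>
        List.take (idx + 1).toNat ls ++ dd.getD idx "" :: List.drop (idx + 1).toNat ls) lines
      = pvWeave dd ks 0 lines := by
  induction ks generalizing lines with
  | nil => exact (pvWeave_nil_keys dd [] lines 0 (by simp)).symm
  | cons k ks ih =>
    obtain ⟨hk0, hkn⟩ := hmem k (List.mem_cons_self ..)
    have hks : ∀ j ∈ ks, j < k := fun j hj => (List.pairwise_cons.mp hsort).1 j hj
    simp only [List.foldl_cons]
    rw [ih _ (List.pairwise_cons.mp hsort).2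
        (fun j hj => by
          obtain ⟨h0, hn⟩ := hmem j (List.mem_cons_of_mem _ hj)
          constructor
          · exact h0
          · simp only [List.length_append, List.length_take, List.length_cons, List.length_drop]
            omega)]
    have : (k + 1).toNat = (k + 1 - 0).toNat := by omega
    rw [this]
    exact pvWeave_insert dd ks k lines 0 (by omega) (by omega) hks

-- A's enumerate loop builds the weave over the truthy keys
theorem pvFold_enum_eq_weave (dd : PySem.Dict Int String) (ks : List Int) (ls : List String)
    (acc : List String) (i : Int)
    (hch : ∀ j : Int, i ≤ j → j < i + ls.length → (j ∈ ks ↔ dd.getD j "" ≠ "")) :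
    (PySem.List.enumerate ls i).foldl (fun out p =>
        match dd.get? p.1 with
        | some figure => if figure ≠ "" then (out ++ [p.2]) ++ [figure] else out ++ [p.2]
        | none => out ++ [p.2]) acc
      = acc ++ pvWeave dd ks i ls := by
  induction ls generalizing i acc with
  | nil => simp [PySem.List.enumerate, pvWeave]
  | cons l ls ih =>
    rw [PySem.List.enumerate_cons]
    simp only [List.foldl_cons]
    rw [ih _ (i + 1) (fun j h1 h2 => hch j (by omega) (by simp; omega))]
    simp only [pvWeave]
    rcases hg : dd.get? i with _ | fig
    · have : dd.getD i "" = "" := by simp [PySem.Dict.getD, hg]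
      have hni : i ∉ ks := fun hm => ((hch i le_rfl (by simp)).mp hm) this
      simp [hni]
    · have hD : dd.getD i "" = fig := by simp [PySem.Dict.getD, hg]
      by_cases hf : fig = ""
      · have hni : i ∉ ks := fun hm => ((hch i le_rfl (by simp)).mp hm) (by rw [hD, hf])
        simp [hf, hni]
      · have hyi : i ∈ ks := (hch i le_rfl (by simp)).mpr (by rw [hD]; exact hf)
        simp [hf, hyi, hD]

-- the two loops compute the same line list
theorem pvMain (dd : PySem.Dict Int String) (lines : List String) (hnd : dd.keys.Nodup) :
    List.foldl (fun out (p : Int × String) =>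
        match dd.get? p.1 with
        | some figure => if figure ≠ "" then (out ++ [p.2]) ++ [figure] else out ++ [p.2]
        | none => out ++ [p.2]) [] (PySem.List.enumerate lines)
    = List.foldl (fun ls idx =>
        if dd.getD idx "" ≠ "" && decide (0 ≤ idx) && decide (idx < (lines.length : Int)) then
          PySem.List.insert ls (idx + 1) (dd.getD idx "")
        else ls) lines (PySem.List.sorted dd.keys id true) := by
  have hperm := PySem.List.sorted_perm dd.keys id true
  have hle := PySem.List.sorted_pairwise_rev dd.keys id
  have hnod0 : (PySem.List.sorted dd.keys id true).Nodup := hperm.nodup_iff.mpr hnd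
  have hstrict : (PySem.List.sorted dd.keys id true).Pairwise (fun a b => b < a) :=
    (hle.and hnod0).imp (fun {a b} h => lt_of_le_of_ne h.1 (Ne.symm h.2))
  have hstrictF : ((PySem.List.sorted dd.keys id true).filter
      (fun idx => dd.getD idx "" ≠ "" && decide (0 ≤ idx) && decide (idx < (lines.length : Int)))).Pairwise
      (fun a b => b < a) := hstrict.filter _
  have hmemF : ∀ k ∈ (PySem.List.sorted dd.keys id true).filter
      (fun idx => dd.getD idx "" ≠ "" && decide (0 ≤ idx) && decide (idx < (lines.length : Int))),
      0 ≤ k ∧ k < (lines.length : Int) := by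
    intro k hk
    have hc := List.of_mem_filter hk
    simp only [Bool.and_eq_true, decide_eq_true_eq] at hc
    exact ⟨hc.1.2, hc.2⟩
  have hch : ∀ j : Int, (0:Int) ≤ j → j < 0 + lines.length →
      (j ∈ (PySem.List.sorted dd.keys id true).filter
        (fun idx => dd.getD idx "" ≠ "" && decide (0 ≤ idx) && decide (idx < (lines.length : Int)))
       ↔ dd.getD j "" ≠ "") := by
    intro j h0 hl
    constructor
    · intro hj
      have hc := List.of_mem_filter hj
      simp only [Bool.and_eq_true, decide_eq_true_eq] at hc
      exact hc.1.1
    · intro hne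
      apply List.mem_filter.mpr
      refine ⟨?_, ?_⟩
      · have hcont : dd.contains j = true := by
          by_contra hc
          have hnone : dd.get? j = none :=
            (PySem.Dict.get?_eq_none_iff_contains dd j).mpr (by simpa using hc)
          simp [PySem.Dict.getD, hnone] at hne
        exact hperm.mem_iff.mpr ((PySem.Dict.contains_iff_mem_keys dd j).mp hcont)
      · simp only [Bool.and_eq_true, decide_eq_true_eq]
        refine ⟨⟨hne, h0⟩, by omega⟩
  calc
    List.foldl (fun out (p : Int × String) =>
        match dd.get? p.1 with
        | some figure => if figure ≠ "" then (out ++ [p.2]) ++ [figure] else out ++ [p.2]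
        | none => out ++ [p.2]) [] (PySem.List.enumerate lines)
      = pvWeave dd ((PySem.List.sorted dd.keys id true).filter
          (fun idx => dd.getD idx "" ≠ "" && decide (0 ≤ idx) && decide (idx < (lines.length : Int)))) 0 lines := by
        simpa using pvFold_enum_eq_weave dd _ lines [] 0 hch
    _ = List.foldl (fun ls idx =>
          List.take (idx + 1).toNat ls ++ dd.getD idx "" :: List.drop (idx + 1).toNat ls) lines
          ((PySem.List.sorted dd.keys id true).filter
            (fun idx => dd.getD idx "" ≠ "" && decide (0 ≤ idx) && decide (idx < (lines.length : Int)))) :=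
        (pvFold_insert_eq_weave dd _ lines hstrictF (fun k hk => by
          have := hmemF k hk; constructor
          · exact this.1
          · have := this.2; omega)).symm
    _ = List.foldl (fun ls idx => PySem.List.insert ls (idx + 1) (dd.getD idx "")) lines
          ((PySem.List.sorted dd.keys id true).filter
            (fun idx => dd.getD idx "" ≠ "" && decide (0 ≤ idx) && decide (idx < (lines.length : Int)))) :=
        PySem.List.foldl_congr_mem _ _ _ _ (fun acc x hx =>
          (pvInsert_eq acc (x + 1) _ (by have := (hmemF x hx).1; omega)).symm)
    _ = List.foldl (fun ls idx =>
          if dd.getD idx "" ≠ "" && decide (0 ≤ idx) && decide (idx < (lines.length : Int)) then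
            PySem.List.insert ls (idx + 1) (dd.getD idx "")
          else ls) lines (PySem.List.sorted dd.keys id true) := List.foldl_filter

-- ===== VERDICT (by name: the statement is the Claim_ definition above) =====
theorem inject_figures_spec : Claim_equal_inject_figures := by
  intro md d _
  unfold Spec_inject_figures inject_figures inject_figures_alt
  by_cases hd : d.isEmpty
  · simp [hd]
  · simp only [hd]
    have hnd : ((d.foldl (fun dd p => dd.insert p.1 p.2) PySem.Dict.empty : PySem.Dict Int String)).keys.Nodup :=
      PySem.Dict.nodup_keys_foldl_insert_key d Prod.fst (fun _ p => p.2) PySem.Dict.empty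
        (by simp [PySem.Dict.keys, PySem.Dict.empty])
    rw [pvMain _ (PySem.Str.splitlines md) hnd]
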